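-- pv_equiv track=rewrite | github.com/ChenPeng03/Lintcode | coins_on_a_line_II/solution.py | firstWillWin
-- ===== SOURCE A (Python) =====
-- def firstWillWin(values):
--     # write your code here
--     # dp[i] means the max value in total from i to end of values
--     # dp[i]= max((values[i] + min(dp[i+2],dp[i+3])),(values[i]+values[i+1] + min(dp[i+3],dp[i+4])))
--     if not values:
--         return False
--     size = len(values)
--     dp = [0] * size
--     dp[size-1] = values[size-1]
--     dp[size-2] = values[size-2] + values[size-1]
--     for i in range(size - 3, -1, -1):
--         if i + 4 <= size - 1:
--             a = dp[i + 4]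
--         else:
--             a = 0
--         if i + 3 <= size - 1:
--             b = dp[i + 3]
--         else:
--             b = 0
--         if i + 2 <= size - 1:
--             c = dp[i + 2]
--         else:
--             c = 0
--         dp[i] = max((values[i] + min(b,c)),(values[i]+values[i+1]+min(a,b)))
--     sum = 0
--     for j in range(size):
--         sum += values[j]
--     if sum - dp[0] >= dp[0]:
--         return False
--     return True
-- ===== SOURCE B (Python) =====
-- def firstWillWin(values):
--     if not values:
--         return False
--     size = len(values)
--     memo = {}
--
--     def best(i):
--         # max total the player to move collects from values[i:]
--         if i > size - 1:
--             return 0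
--         if i in memo:
--             return memo[i]
--         if i == size - 1:
--             r = values[i]
--         elif i == size - 2:
--             r = values[i] + values[i + 1]
--         else:
--             take_one = values[i] + min(best(i + 3), best(i + 2))
--             take_two = values[i] + values[i + 1] + min(best(i + 4), best(i + 3))
--             r = max(take_one, take_two)
--         memo[i] = r
--         return r
--
--     # seed the memo at spaced points so each call recurses only a few hundred
--     # frames deep (stays well inside Python's recursion limit on long inputs)
--     for s in range(size - 1, -1, -500):
--         best(s)
--     first = best(0)
--     return sum(values) - first < first
-- ===== Notes on version B (the rewrite author's own statement) =====
-- stated objective: alternative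
-- what changed: A's bottom-up length-n dp array (seeded via negative-index writes, filled by a reverse index loop with bounds-checked reads, total summed by an explicit loop) is replaced by a top-down memoized recursion best(i) with a memo dict (plus a spaced seeding loop to keep the recursion shallow on long inputs) and the built-in sum.
import Mathlib
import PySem

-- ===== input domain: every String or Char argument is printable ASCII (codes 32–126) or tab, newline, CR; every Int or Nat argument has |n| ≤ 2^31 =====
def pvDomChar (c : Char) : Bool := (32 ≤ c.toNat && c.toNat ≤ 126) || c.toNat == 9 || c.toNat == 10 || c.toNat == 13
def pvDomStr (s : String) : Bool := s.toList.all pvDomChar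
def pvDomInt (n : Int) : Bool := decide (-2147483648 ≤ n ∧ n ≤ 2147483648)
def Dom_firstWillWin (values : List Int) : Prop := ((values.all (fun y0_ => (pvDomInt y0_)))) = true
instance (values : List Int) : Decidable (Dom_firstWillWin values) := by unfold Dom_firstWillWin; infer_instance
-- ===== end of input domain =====

-- B replaces A's bottom-up dp-array loop by a top-down memoized recursion best(i) over the
-- suffix start, with a memo dict — objective: alternative decomposition (same asymptotic cost).


-- ===== PORT A =====
-- loop body of 'for i in range(size - 3, -1, -1)'; all dp/values accesses are in range
-- (or, when size == 1, follow Python's negative indexing), so pyGetD/pySetD are exact here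
def aStep (values : List Int) (size : Int) (dp : List Int) (i : Int) : List Int :=
  let a := if i + 4 ≤ size - 1 then PySem.List.pyGetD dp (i + 4) 0 else 0
  let b := if i + 3 ≤ size - 1 then PySem.List.pyGetD dp (i + 3) 0 else 0
  let c := if i + 2 ≤ size - 1 then PySem.List.pyGetD dp (i + 2) 0 else 0
  PySem.List.pySetD dp i
    (max (PySem.List.pyGetD values i 0 + min b c)
         (PySem.List.pyGetD values i 0 + PySem.List.pyGetD values (i + 1) 0 + min a b))

def firstWillWin (values : List Int) : Bool :=
  if values = [] then false
  else
    let size : Int := values.length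
    let dp0 : List Int := List.replicate values.length 0
    let dp1 := PySem.List.pySetD dp0 (size - 1) (PySem.List.pyGetD values (size - 1) 0)
    let dp2 := PySem.List.pySetD dp1 (size - 2)
        (PySem.List.pyGetD values (size - 2) 0 + PySem.List.pyGetD values (size - 1) 0)
    let dpF := (PySem.List.pyRange (size - 3) (-1) (-1)).foldl (aStep values size) dp2
    let s := (PySem.List.pyRange 0 size 1).foldl
        (fun acc j => acc + PySem.List.pyGetD values j 0) 0
    if s - PySem.List.pyGetD dpF 0 0 ≥ PySem.List.pyGetD dpF 0 0 then false else true

-- ===== PORT B =====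
-- Source B's recursive helper best(i) with its memo dict threaded through the calls in
-- Python's evaluation order; values[...] accesses are in range, so pyGetD is exact
def bBestM (values : List Int) (size : Nat) (i : Nat) (memo : PySem.Dict Int Int)
    (fuel : Nat) : Int × PySem.Dict Int Int :=
  match fuel with
  | 0 => (0, memo)   -- totality guard only: never reached when fuel > size - i
  | fuel + 1 =>
    if _hg : size - 1 < i then (0, memo)
    else
      match memo.get? (i : Int) with
      | some r => (r, memo)
      | none =>
        if _h1 : i = size - 1 then
          let r := PySem.List.pyGetD values (i : Int) 0
          (r, memo.insert (i : Int) r)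
        else if _h2 : i = size - 2 then
          let r := PySem.List.pyGetD values (i : Int) 0 + PySem.List.pyGetD values ((i : Int) + 1) 0
          (r, memo.insert (i : Int) r)
        else
          let p3 := bBestM values size (i + 3) memo fuel
          let p2 := bBestM values size (i + 2) p3.2 fuel
          let takeOne := PySem.List.pyGetD values (i : Int) 0 + min p3.1 p2.1
          let p4 := bBestM values size (i + 4) p2.2 fuel
          let p3b := bBestM values size (i + 3) p4.2 fuel
          let takeTwo := PySem.List.pyGetD values (i : Int) 0 +
              PySem.List.pyGetD values ((i : Int) + 1) 0 + min p4.1 p3b.1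
          let r := max takeOne takeTwo
          (r, p3b.2.insert (i : Int) r)

-- Source B's memo-seeding loop 'for s in range(size - 1, -1, -500): best(s)'; the loop
-- indices are nonnegative, so the Nat index (s.toNat) is exact
def firstWillWin_alt (values : List Int) : Bool :=
  if values = [] then false
  else
    let memo := (PySem.List.pyRange ((values.length : Int) - 1) (-1) (-500)).foldl
        (fun m s => (bBestM values values.length s.toNat m (values.length + 1)).2)
        PySem.Dict.empty
    let first := (bBestM values values.length 0 memo (values.length + 1)).1
    decide (values.sum - first < first)

-- ===== PRECONDITION & SPEC =====
def Spec_firstWillWin (values : List Int) (out : Bool) : Prop := out = firstWillWin_alt values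
instance (values : List Int) (out : Bool) : Decidable (Spec_firstWillWin values out) := by unfold Spec_firstWillWin; infer_instance

-- ===== CLAIM (what is proved, stated in full; the proofs are below) =====
def Claim_equal_firstWillWin : Prop := ∀ (values : List Int), Dom_firstWillWin values → Spec_firstWillWin values (firstWillWin values)

-- ===== LEMMAS AND PROOFS =====

-- proof-side characterisation shared by both programs: best total the player to move can
-- collect from values[i:], with A's forced-pair convention at the last two indices
def bSpec (values : List Int) (i : Nat) : Int :=
  if _h0 : values.length ≤ i then 0
  else if _h1 : i = values.length - 1 then values.getD i 0
  else if _h2 : i = values.length - 2 then values.getD i 0 + values.getD (i + 1) 0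
  else
    max (values.getD i 0 + min (bSpec values (i + 3)) (bSpec values (i + 2)))
        (values.getD i 0 + values.getD (i + 1) 0 +
          min (bSpec values (i + 4)) (bSpec values (i + 3)))
termination_by values.length - i
decreasing_by all_goals omega

theorem bSpec_out (values : List Int) (i : Nat) (h : values.length ≤ i) :
    bSpec values i = 0 := by
  rw [bSpec, dif_pos h]

theorem bSpec_last (values : List Int) (h : 1 ≤ values.length) :
    bSpec values (values.length - 1) = values.getD (values.length - 1) 0 := by
  rw [bSpec, dif_neg (by omega), dif_pos rfl]

theorem bSpec_pen (values : List Int) (h : 2 ≤ values.length) :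
    bSpec values (values.length - 2) =
      values.getD (values.length - 2) 0 + values.getD (values.length - 1) 0 := by
  rw [bSpec, dif_neg (by omega), dif_neg (by omega), dif_pos rfl]
  have : values.length - 2 + 1 = values.length - 1 := by omega
  rw [this]

theorem bSpec_rec (values : List Int) (m : Nat) (hm : m + 3 ≤ values.length) :
    bSpec values m =
      max (values.getD m 0 + min (bSpec values (m + 3)) (bSpec values (m + 2)))
          (values.getD m 0 + values.getD (m + 1) 0 +
            min (bSpec values (m + 4)) (bSpec values (m + 3))) := by
  rw [bSpec, dif_neg (by omega), dif_neg (by omega), dif_neg (by omega)]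

-- ---- B side: the memo only ever holds correct entries ----
def MemoOK (values : List Int) (memo : PySem.Dict Int Int) : Prop :=
  ∀ (j : Nat) (r : Int), memo.get? (j : Int) = some r → r = bSpec values j

theorem memoOK_empty (values : List Int) : MemoOK values PySem.Dict.empty := by
  intro j r h
  simp [PySem.Dict.get?_empty] at h

theorem bBestM_ok (fuel : Nat) : ∀ (values : List Int) (i : Nat) (memo : PySem.Dict Int Int),
    1 ≤ values.length → values.length - i < fuel → MemoOK values memo →
    (bBestM values values.length i memo fuel).1 = bSpec values i ∧
      MemoOK values (bBestM values values.length i memo fuel).2 := by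
  induction fuel with
  | zero => intro values i memo _ hn _; omega
  | succ n ih =>
      intro values i memo hlen hn hm
      by_cases hg : values.length - 1 < i
      · rw [bBestM, dif_pos hg]
        exact ⟨(bSpec_out values i (by omega)).symm, hm⟩
      · rw [bBestM, dif_neg hg]
        cases hget : memo.get? (i : Int) with
        | some r =>
            simp only []
            exact ⟨(hm i r hget).symm ▸ rfl, hm⟩
        | none =>
            simp only []
            have hins : ∀ r : Int, ∀ memo' : PySem.Dict Int Int, MemoOK values memo' →
                r = bSpec values i → MemoOK values (memo'.insert (i : Int) r) := by
              intro r memo' hm' hr j r' hj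
              rw [PySem.Dict.get?_insert] at hj
              by_cases hji : (j : Int) = (i : Int)
              · have : j = i := by omega
                subst this
                rw [if_pos rfl] at hj
                cases hj; exact hr
              · rw [if_neg hji] at hj
                exact hm' j r' hj
            by_cases h1 : i = values.length - 1
            · rw [dif_pos h1]
              have hv : PySem.List.pyGetD values (i : Int) 0 = bSpec values i := by
                rw [PySem.List.pyGetD_natCast, h1, bSpec_last values hlen]
              exact ⟨hv, hins _ _ hm hv⟩
            · rw [dif_neg h1]
              by_cases h2 : i = values.length - 2
              · rw [dif_pos h2]
                have hlen2 : 2 ≤ values.length := by omega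
                have hv : PySem.List.pyGetD values (i : Int) 0 +
                    PySem.List.pyGetD values ((i : Int) + 1) 0 = bSpec values i := by
                  have e1 : (i : Int) + 1 = ((i + 1 : Nat) : Int) := by push_cast; ring
                  rw [PySem.List.pyGetD_natCast, e1, PySem.List.pyGetD_natCast, h2,
                    bSpec_pen values hlen2]
                  have : values.length - 2 + 1 = values.length - 1 := by omega
                  rw [this]
                exact ⟨hv, hins _ _ hm hv⟩
              · rw [dif_neg h2]
                have hi3 : i + 3 ≤ values.length := by omega
                have hlt : i < values.length := by omega
                obtain ⟨e3, m3⟩ := ih values (i + 3) memo hlen (by omega) hm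
                obtain ⟨e2, m2⟩ := ih values (i + 2) _ hlen (by omega) m3
                obtain ⟨e4, m4⟩ := ih values (i + 4) _ hlen (by omega) m2
                obtain ⟨e3b, m3b⟩ := ih values (i + 3) _ hlen (by omega) m4
                have e1 : (i : Int) + 1 = ((i + 1 : Nat) : Int) := by push_cast; ring
                have hv : max (PySem.List.pyGetD values (i : Int) 0 +
                      min (bBestM values values.length (i + 3) memo n).1
                          (bBestM values values.length (i + 2)
                            (bBestM values values.length (i + 3) memo n).2 n).1)
                    (PySem.List.pyGetD values (i : Int) 0 +
                      PySem.List.pyGetD values ((i : Int) + 1) 0 +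
                      min (bBestM values values.length (i + 4)
                            (bBestM values values.length (i + 2)
                              (bBestM values values.length (i + 3) memo n).2 n).2 n).1
                          (bBestM values values.length (i + 3)
                            (bBestM values values.length (i + 4)
                              (bBestM values values.length (i + 2)
                                (bBestM values values.length (i + 3) memo n).2 n).2 n).2 n).1) =
                    bSpec values i := by
                  rw [e3, e2, e4, e3b, PySem.List.pyGetD_natCast, e1,
                    PySem.List.pyGetD_natCast, bSpec_rec values i hi3]
                exact ⟨hv, hins _ _ m3b hv⟩

-- the seeding loop only ever adds correct memo entries
theorem seed_ok (values : List Int) (l : List Int) (memo : PySem.Dict Int Int)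
    (hlen : 1 ≤ values.length) (hm : MemoOK values memo) :
    MemoOK values (l.foldl
      (fun m s => (bBestM values values.length s.toNat m (values.length + 1)).2) memo) := by
  induction l generalizing memo with
  | nil => exact hm
  | cons s rest ih =>
      rw [List.foldl_cons]
      exact ih _ ((bBestM_ok (values.length + 1) values s.toNat memo hlen (by omega) hm).2)

-- B returns decide (sum - bSpec 0 < bSpec 0) on a nonempty list
theorem alt_eq (values : List Int) (h : values ≠ []) :
    firstWillWin_alt values =
      decide (values.sum - bSpec values 0 < bSpec values 0) := by
  unfold firstWillWin_alt
  rw [if_neg h]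
  have hlen : 1 ≤ values.length := by
    cases values with
    | nil => exact absurd rfl h
    | cons a l => simp
  obtain ⟨e0, _⟩ := bBestM_ok (values.length + 1) values 0 _ hlen (by omega)
    (seed_ok values (PySem.List.pyRange ((values.length : Int) - 1) (-1) (-500))
      PySem.Dict.empty hlen (memoOK_empty values))
  simp only [e0]

-- ---- A side: dp agrees with bSpec from index i upward ----
def DpInv (values dp : List Int) (i : Nat) : Prop :=
  dp.length = values.length ∧
  ∀ j : Nat, i ≤ j → j < values.length → dp.getD j 0 = bSpec values j

theorem step_inv (values dp : List Int) (m : Nat) (hm : m + 3 ≤ values.length)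
    (h : DpInv values dp (m + 1)) :
    DpInv values (aStep values (values.length : Int) dp (m : Int)) m := by
  obtain ⟨hlen, hval⟩ := h
  unfold aStep
  have e4 : (m : Int) + 4 = ((m + 4 : Nat) : Int) := by push_cast; ring
  have e3 : (m : Int) + 3 = ((m + 3 : Nat) : Int) := by push_cast; ring
  have e2 : (m : Int) + 2 = ((m + 2 : Nat) : Int) := by push_cast; ring
  have e1 : (m : Int) + 1 = ((m + 1 : Nat) : Int) := by push_cast; ring
  simp only [e4, e3, e2, e1, PySem.List.pyGetD_natCast, PySem.List.pySetD_natCast]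
  have hX4 : (if ((m + 4 : Nat) : Int) ≤ (values.length : Int) - 1 then dp.getD (m + 4) 0 else 0) =
      bSpec values (m + 4) := by
    split_ifs with g1
    · exact hval _ (by omega) (by omega)
    · exact (bSpec_out values (m + 4) (by omega)).symm
  have hX3 : (if ((m + 3 : Nat) : Int) ≤ (values.length : Int) - 1 then dp.getD (m + 3) 0 else 0) =
      bSpec values (m + 3) := by
    split_ifs with g1
    · exact hval _ (by omega) (by omega)
    · exact (bSpec_out values (m + 3) (by omega)).symm
  have hX2 : (if ((m + 2 : Nat) : Int) ≤ (values.length : Int) - 1 then dp.getD (m + 2) 0 else 0) =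
      bSpec values (m + 2) := by
    split_ifs with g1
    · exact hval _ (by omega) (by omega)
    · omega
  rw [hX4, hX3, hX2]
  constructor
  · simpa using hlen
  · intro j hj hjlt
    by_cases hjm : j = m
    · subst hjm
      rw [List.getD, List.getElem?_set_self (by omega), Option.getD_some, bSpec_rec values j hm]
    · have hj1 : m + 1 ≤ j := by omega
      rw [List.getD, List.getElem?_set_ne (by omega), ← List.getD]
      exact hval j hj1 hjlt

theorem loop_inv (values : List Int) (m : Nat) (hm : m + 2 ≤ values.length) :
    ∀ dp : List Int, DpInv values dp m →
      DpInv values ((PySem.List.pyRange ((m : Int) - 1) (-1) (-1)).foldl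
        (aStep values (values.length : Int)) dp) 0 := by
  induction m with
  | zero =>
      intro dp h
      rw [PySem.List.pyRange_neg_one_eq_nil (by omega)]
      exact h
  | succ m ih =>
      intro dp h
      have e : ((m + 1 : Nat) : Int) - 1 = (m : Int) := by push_cast; ring
      rw [e, PySem.List.pyRange_neg_one_cons (by omega), List.foldl_cons]
      exact ih (by omega) _ (step_inv values dp m (by omega) h)

-- ---- assembling the two programs ----
theorem main_ge2 (values : List Int) (hn : 2 ≤ values.length) :
    firstWillWin values = firstWillWin_alt values := by
  have hne : values ≠ [] := by intro h; rw [h] at hn; simp at hn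
  have en1 : (values.length : Int) - 1 = ((values.length - 1 : Nat) : Int) := by
    push_cast [Nat.cast_sub (by omega : 1 ≤ values.length)]; ring
  have en2 : (values.length : Int) - 2 = ((values.length - 2 : Nat) : Int) := by
    push_cast [Nat.cast_sub (by omega : 2 ≤ values.length)]; ring
  have erange : (values.length : Int) - 3 = ((values.length - 2 : Nat) : Int) - 1 := by
    push_cast [Nat.cast_sub (by omega : 2 ≤ values.length)]; ring
  rw [alt_eq values hne]
  unfold firstWillWin
  rw [if_neg hne]
  simp only [en1, en2, erange, PySem.List.pyGetD_natCast, PySem.List.pySetD_natCast]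
  set dp2 := ((List.replicate values.length (0:Int)).set (values.length - 1)
      (values.getD (values.length - 1) 0)).set (values.length - 2)
      (values.getD (values.length - 2) 0 + values.getD (values.length - 1) 0) with hdp2
  have hinv2 : DpInv values dp2 (values.length - 2) := by
    constructor
    · simp [hdp2]
    · intro j hj hjlt
      by_cases hj2 : j = values.length - 2
      · subst hj2
        rw [hdp2, List.getD, List.getElem?_set_self (by simp; omega), Option.getD_some,
          bSpec_pen values hn]
      · have hj1 : j = values.length - 1 := by omega
        subst hj1
        rw [hdp2, List.getD, List.getElem?_set_ne (by omega),
          List.getElem?_set_self (by simp; omega), Option.getD_some, bSpec_last values (by omega)]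
  obtain ⟨hlenF, hvalF⟩ := loop_inv values (values.length - 2) (by omega) dp2 hinv2
  rw [PySem.List.pyGetD_zero, hvalF 0 (by omega) (by omega)]
  rw [PySem.List.foldl_pyRange_zero_pyGetD' values 0 (fun a b => a + b) 0]
  have hsum : values.foldl (fun a b => a + b) 0 = values.sum := by
    simp [List.sum_eq_foldl]
  rw [hsum]
  split_ifs with hge
  · simp; omega
  · simp; omega

theorem main_singleton (x : Int) : firstWillWin [x] = firstWillWin_alt [x] := by
  have halt : firstWillWin_alt [x] = decide ((0:Int) < x) := by
    rw [alt_eq [x] (by simp)]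
    have e : bSpec [x] 0 = x := by
      have := bSpec_last [x] (by simp)
      simpa using this
    rw [e]
    simp
  unfold firstWillWin
  rw [if_neg (by simp)]
  norm_num
  have e1 : PySem.List.pyGetD (PySem.List.pySetD (PySem.List.pySetD [0] 0 x) (-1)
      (PySem.List.pyGetD [x] (-1) 0 + x)) 0 0 = x + x := rfl
  have e2 : List.foldl (fun acc j => acc + PySem.List.pyGetD [x] j 0) 0
      (PySem.List.pyRange 0 1 1) = 0 + x := rfl
  rw [e1, e2, halt]
  by_cases hx : (0:Int) < x
  · rw [decide_eq_false (by omega), decide_eq_true hx]; rfl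
  · rw [decide_eq_true (by omega), decide_eq_false hx]; rfl

theorem main_eq (values : List Int) : firstWillWin values = firstWillWin_alt values := by
  match values with
  | [] => simp [firstWillWin, firstWillWin_alt]
  | [x] => exact main_singleton x
  | x :: y :: rest => exact main_ge2 (x :: y :: rest) (by simp)

-- ===== VERDICT (by name: the statement is the Claim_ definition above) =====
theorem firstWillWin_spec : Claim_equal_firstWillWin := by
  intro values _
  unfold Spec_firstWillWin
  exact main_eq values
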